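-- pv_equiv track=rewrite | github.com/JHull1234/SGM-Builder | ml_sgm_picker.py | _get_teammate_pairs
-- ===== SOURCE A (Python) =====
-- from typing import Dict, List, Optional, Tuple
--
-- def _get_teammate_pairs(players: List[str]) -> List[Tuple[str, str]]:
--     """Get teammate pairs from player list"""
--     team_mapping = {
--         "Clayton Oliver": "Melbourne",
--         "Christian Petracca": "Melbourne",
--         "Marcus Bontempelli": "Western Bulldogs",
--         "Adam Treloar": "Western Bulldogs",
--         "Jeremy Cameron": "Geelong",
--         "Tom Hawkins": "Geelong"
--     }
--
--     teammate_pairs = []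
--     for i, player1 in enumerate(players):
--         for player2 in players[i+1:]:
--             team1 = team_mapping.get(player1)
--             team2 = team_mapping.get(player2)
--             if team1 and team2 and team1 == team2:
--                 teammate_pairs.append((player1, player2))
--
--     return teammate_pairs
-- ===== SOURCE B (Python) =====
-- from typing import Dict, List, Optional, Tuple
--
-- def _get_teammate_pairs(players: List[str]) -> List[Tuple[str, str]]:
--     """Get teammate pairs by bucketing players per team, then emitting each
--     player's later bucket-mates (no cross-team comparisons at all)."""
--     team_mapping = {
--         "Clayton Oliver": "Melbourne",
--         "Christian Petracca": "Melbourne",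
--         "Marcus Bontempelli": "Western Bulldogs",
--         "Adam Treloar": "Western Bulldogs",
--         "Jeremy Cameron": "Geelong",
--         "Tom Hawkins": "Geelong"
--     }
--
--     # one pass: per-team buckets in input order; remember each mapped player's
--     # team and its position inside its bucket
--     buckets = {}
--     order = []
--     for p in players:
--         t = team_mapping.get(p)
--         if t:
--             lst = buckets.setdefault(t, [])
--             order.append((p, t, len(lst)))
--             lst.append(p)
--
--     # second pass: each mapped player pairs with the LATER members of its own
--     # bucket only — same (i, j) order as scanning all later players, since a
--     # bucket keeps input order
--     pairs = []
--     for p1, t, k in order: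
--         for p2 in buckets[t][k + 1:]:
--             pairs.append((p1, p2))
--     return pairs
-- ===== Notes on version B (the rewrite author's own statement) =====
-- stated objective: faster
-- what changed: B replaces A's all-pairs double scan with a group-by-team hash of buckets: one pass files each mapped player into its team's bucket (recording its bucket position), then each player is paired only with the later members of its own bucket, so no cross-team candidate pair is ever examined.
import Mathlib
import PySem

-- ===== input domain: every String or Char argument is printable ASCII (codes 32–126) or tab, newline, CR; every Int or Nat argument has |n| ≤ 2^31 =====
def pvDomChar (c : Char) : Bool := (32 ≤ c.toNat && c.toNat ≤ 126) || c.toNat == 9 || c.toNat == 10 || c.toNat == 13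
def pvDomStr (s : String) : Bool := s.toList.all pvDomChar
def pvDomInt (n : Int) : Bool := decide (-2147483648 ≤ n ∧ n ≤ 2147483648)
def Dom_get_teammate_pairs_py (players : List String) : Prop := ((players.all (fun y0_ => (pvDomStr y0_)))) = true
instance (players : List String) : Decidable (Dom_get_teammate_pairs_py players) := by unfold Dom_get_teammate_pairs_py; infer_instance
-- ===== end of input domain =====

-- B buckets the players per team in one pass (recording each mapped player's position in its bucket) and then
-- pairs each player only with the later members of its own bucket, so no cross-team pair is ever examined
-- (objective: faster; the all-pairs scan disappears).

-- ===== PORT A =====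
def teamMappingA : PySem.Dict String String := PySem.Dict.ofList
  [("Clayton Oliver", "Melbourne"), ("Christian Petracca", "Melbourne"),
   ("Marcus Bontempelli", "Western Bulldogs"), ("Adam Treloar", "Western Bulldogs"),
   ("Jeremy Cameron", "Geelong"), ("Tom Hawkins", "Geelong")]

-- Python truthiness of an Optional[str]: None and "" are falsy
def strOptTruthy (o : Option String) : Bool :=
  match o with
  | none => false
  | some s => s != ""

def get_teammate_pairs_py (players : List String) : List (String × String) :=
  (PySem.List.enumerate players).foldl
    (fun acc ip =>
      (PySem.List.slice players (some (ip.1 + 1)) none).foldl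
        (fun acc2 p2 =>
          let t1 := teamMappingA.get? ip.2
          let t2 := teamMappingA.get? p2
          if strOptTruthy t1 && strOptTruthy t2 && t1 == t2 then acc2 ++ [(ip.2, p2)] else acc2)
        acc)
    []

-- ===== PORT B =====
def teamMappingB : PySem.Dict String String := PySem.Dict.ofList
  [("Clayton Oliver", "Melbourne"), ("Christian Petracca", "Melbourne"),
   ("Marcus Bontempelli", "Western Bulldogs"), ("Adam Treloar", "Western Bulldogs"),
   ("Jeremy Cameron", "Geelong"), ("Tom Hawkins", "Geelong")]

-- first loop of Source B: buckets.setdefault(t, []) + append is, on the dict, insert of (old bucket ++ [p]);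
-- second loop: 'buckets[t]' is ported as getD with [], exact here because t was inserted when (p1, t, k)
-- was appended to order, and Dict.insert never removes a key
def get_teammate_pairs_py_alt (players : List String) : List (String × String) :=
  let st := players.foldl
    (fun (st : PySem.Dict String (List String) × List (String × String × Int)) p =>
      match teamMappingB.get? p with
      | some t =>
        if t != "" then
          let lst := st.1.getD t []
          (st.1.insert t (lst ++ [p]), st.2 ++ [(p, t, (lst.length : Int))])
        else st
      | none => st)
    (PySem.Dict.empty, [])
  st.2.foldl
    (fun acc x =>
      (PySem.List.slice (st.1.getD x.2.1 []) (some (x.2.2 + 1)) none).foldl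
        (fun acc2 p2 => acc2 ++ [(x.1, p2)]) acc)
    []

-- ===== PRECONDITION & SPEC =====
def Spec_get_teammate_pairs_py (players : List String) (out : List (String × String)) : Prop := out = get_teammate_pairs_py_alt players
instance (players : List String) (out : List (String × String)) : Decidable (Spec_get_teammate_pairs_py players out) := by unfold Spec_get_teammate_pairs_py; infer_instance

-- ===== CLAIM (what is proved, stated in full; the proofs are below) =====
def Claim_equal_get_teammate_pairs_py : Prop := ∀ (players : List String), Dom_get_teammate_pairs_py players → Spec_get_teammate_pairs_py players (get_teammate_pairs_py players)

-- ===== LEMMAS AND PROOFS =====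

-- all-ordered-pairs loop written as structural recursion
def pairRec {α β : Type} (cond : α → α → Bool) (f : α → α → β) : List α → List β
  | [] => []
  | x :: xs => ((xs.filter (cond x)).map (f x)) ++ pairRec cond f xs

-- players mapped to their teams (the common reference list of both proofs)
def mapOf (ps : List String) : List (String × String) :=
  ps.filterMap (fun p => (teamMappingA.get? p).map (fun t => (p, t)))

-- the bucket of team t over a mapped list
def bspec (ys : List (String × String)) (t : String) : List String :=
  (ys.filter (fun y => y.2 == t)).map Prod.fst

-- the order list Source B builds, as a function of the mapped list (third component = bucket position)
def ordOf : List (String × String) → List (String × String) → List (String × String × Int)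
  | _, [] => []
  | pre, y :: suf => (y.1, y.2, ((bspec pre y.2).length : Int)) :: ordOf (pre ++ [y]) suf

theorem bspec_append (a b : List (String × String)) (t : String) :
    bspec (a ++ b) t = bspec a t ++ bspec b t := by
  simp [bspec, List.filter_append]

-- every value of the team map is a nonempty string
theorem teamMap_val_ne_empty (p t : String) (h : teamMappingA.get? p = some t) : t ≠ "" := by
  have hm := PySem.Dict.mem_items_of_get?_eq_some teamMappingA h
  have hit : teamMappingA.items =
    [("Clayton Oliver", "Melbourne"), ("Christian Petracca", "Melbourne"),
     ("Marcus Bontempelli", "Western Bulldogs"), ("Adam Treloar", "Western Bulldogs"),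
     ("Jeremy Cameron", "Geelong"), ("Tom Hawkins", "Geelong")] := by decide
  rw [hit] at hm
  simp only [List.mem_cons, List.not_mem_nil, or_false, Prod.mk.injEq] at hm
  rcases hm with ⟨_, h⟩ | ⟨_, h⟩ | ⟨_, h⟩ | ⟨_, h⟩ | ⟨_, h⟩ | ⟨_, h⟩ <;> subst h <;> decide

-- ---- A side: the enumerate/slice nested loop equals pairRec (generalized over a consumed prefix)
theorem pair_loop_aux {α β : Type} (cond : α → α → Bool) (f : α → α → β) :
    ∀ (xs pre : List α) (acc : List β),
      (PySem.List.enumerate xs (pre.length : Int)).foldl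
        (fun acc ip =>
          (PySem.List.slice (pre ++ xs) (some (ip.1 + 1)) none).foldl
            (fun acc2 y => if cond ip.2 y then acc2 ++ [f ip.2 y] else acc2)
            acc)
        acc
      = acc ++ pairRec cond f xs := by
  intro xs
  induction xs with
  | nil => intro pre acc; simp [PySem.List.enumerate, pairRec]
  | cons x t ih =>
    intro pre acc
    rw [PySem.List.enumerate_cons]
    simp only [List.foldl_cons]
    have hslice : PySem.List.slice (pre ++ x :: t) (some ((pre.length : Int) + 1)) none = t := by
      have hc : ((pre.length : Int) + 1) = ((pre.length + 1 : Nat) : Int) := by push_cast; ring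
      rw [hc, PySem.List.slice_from_natCast]
      rw [show pre ++ x :: t = (pre ++ [x]) ++ t by simp]
      rw [List.drop_append_of_le_length (by simp)]
      simp
    rw [hslice, PySem.List.foldl_append_if]
    have hlen : (pre.length : Int) + 1 = (((pre ++ [x]).length : Nat) : Int) := by
      simp
    have hpre : pre ++ x :: t = (pre ++ [x]) ++ t := by simp
    rw [hlen, hpre, ih (pre ++ [x])]
    simp [pairRec]

-- A's pair condition for a mapped first player, pushed through the mapping pass
theorem inner_eq (p t : String) (ht : t ≠ "") :
    ∀ (xs : List String),
      (xs.filter (fun q =>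
          strOptTruthy (some t) && strOptTruthy (teamMappingA.get? q)
            && ((some t : Option String) == teamMappingA.get? q))).map (fun q => (p, q))
      = ((mapOf xs).filter (fun q => t == q.2)).map (fun q => (p, q.1)) := by
  intro xs
  induction xs with
  | nil => simp [mapOf]
  | cons q rest ih =>
    cases hq : teamMappingA.get? q with
    | none =>
      simp only [List.filter_cons, mapOf, List.filterMap_cons, hq, Option.map_none]
      rw [if_neg (by simp [strOptTruthy])]
      exact ih
    | some u =>
      have hu : u ≠ "" := teamMap_val_ne_empty q u hq
      by_cases htu : t = u
      · subst htu
        simp only [List.filter_cons, mapOf, List.filterMap_cons, hq, Option.map_some]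
        rw [if_pos (by simp [strOptTruthy, bne_iff_ne, ht]), if_pos (by simp)]
        simp only [List.map_cons]
        rw [show (mapOf rest) = rest.filterMap (fun p => (teamMappingA.get? p).map (fun t => (p, t))) from rfl] at ih
        simp [ih]
      · have hf : (t == u) = false := by simp [htu]
        simp only [List.filter_cons, mapOf, List.filterMap_cons, hq, Option.map_some]
        rw [if_neg (by simp [strOptTruthy, htu]), if_neg (by simp [htu])]
        exact ih

-- A's pairRec over players equals B's reference pairRec over the mapped list
theorem pairRec_eq (ps : List String) :
    pairRec (fun p1 p2 =>
        strOptTruthy (teamMappingA.get? p1) && strOptTruthy (teamMappingA.get? p2)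
          && (teamMappingA.get? p1 == teamMappingA.get? p2))
      (fun p1 p2 => (p1, p2)) ps
    = pairRec (fun y q => y.2 == q.2) (fun y q => (y.1, q.1)) (mapOf ps) := by
  induction ps with
  | nil => rfl
  | cons p rest ih =>
    cases hp : teamMappingA.get? p with
    | none =>
      simp only [pairRec, mapOf, List.filterMap_cons, hp, Option.map_none]
      have h0 : (rest.filter (fun p2 =>
          strOptTruthy (none : Option String) && strOptTruthy (teamMappingA.get? p2)
            && ((none : Option String) == teamMappingA.get? p2))) = [] := by
        rw [List.filter_eq_nil_iff]
        intro a _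
        simp [strOptTruthy]
      rw [h0]
      simpa [mapOf] using ih
    | some t =>
      have ht : t ≠ "" := teamMap_val_ne_empty p t hp
      simp only [pairRec, mapOf, List.filterMap_cons, hp, Option.map_some]
      rw [show rest.filterMap (fun p => (teamMappingA.get? p).map (fun t => (p, t))) = mapOf rest from rfl,
        inner_eq p t ht rest, ih]

-- ---- B side: the building pass produces bspec buckets and the ordOf order list
theorem build_inv :
    ∀ (ps : List String) (d : PySem.Dict String (List String))
      (ord : List (String × String × Int)) (pre : List (String × String)),
      (∀ t, d.getD t [] = bspec pre t) →
      (ps.foldl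
        (fun (st : PySem.Dict String (List String) × List (String × String × Int)) p =>
          match teamMappingB.get? p with
          | some t =>
            if t != "" then
              let lst := st.1.getD t []
              (st.1.insert t (lst ++ [p]), st.2 ++ [(p, t, (lst.length : Int))])
            else st
          | none => st)
        (d, ord)).2 = ord ++ ordOf pre (mapOf ps)
      ∧ ∀ t, (ps.foldl
        (fun (st : PySem.Dict String (List String) × List (String × String × Int)) p =>
          match teamMappingB.get? p with
          | some t =>
            if t != "" then
              let lst := st.1.getD t []
              (st.1.insert t (lst ++ [p]), st.2 ++ [(p, t, (lst.length : Int))])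
            else st
          | none => st)
        (d, ord)).1.getD t [] = bspec (pre ++ mapOf ps) t := by
  intro ps
  induction ps with
  | nil => intro d ord pre h; simp [mapOf, ordOf, h]
  | cons p rest ih =>
    intro d ord pre h
    cases hp : teamMappingB.get? p with
    | none =>
      simp only [List.foldl_cons, hp]
      have : mapOf (p :: rest) = mapOf rest := by simp [mapOf, show teamMappingA.get? p = none from hp]
      rw [this]
      exact ih d ord pre h
    | some t =>
      have ht : t ≠ "" := teamMap_val_ne_empty p t hp
      have hb : (t != "") = true := by simp [ht]
      simp only [List.foldl_cons, hp, hb, if_true]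
      have hmap : mapOf (p :: rest) = (p, t) :: mapOf rest := by
        simp [mapOf, show teamMappingA.get? p = some t from hp]
      have h' : ∀ t', (d.insert t (d.getD t [] ++ [p])).getD t' [] = bspec (pre ++ [(p, t)]) t' := by
        intro t'
        rw [PySem.Dict.getD_insert, bspec_append, h]
        by_cases hc : t' = t
        · subst hc; simp [bspec]
        · rw [if_neg hc]
          have : bspec [(p, t)] t' = [] := by simp [bspec, Ne.symm hc]
          simp [this, h t']
      have := ih (d.insert t (d.getD t [] ++ [p])) (ord ++ [(p, t, ((d.getD t []).length : Int))]) (pre ++ [(p, t)]) h'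
      rw [hmap]
      constructor
      · rw [this.1]
        simp [ordOf, h t, bspec]
      · intro u
        rw [this.2 u]
        simp
-- the emitting pass over ordOf equals pairRec over the mapped list
theorem emit_inv (D : PySem.Dict String (List String)) (mp : List (String × String))
    (hD : ∀ t, D.getD t [] = bspec mp t) :
    ∀ (suf pre : List (String × String)) (acc : List (String × String)),
      pre ++ suf = mp →
      (ordOf pre suf).foldl
        (fun acc x =>
          (PySem.List.slice (D.getD x.2.1 []) (some (x.2.2 + 1)) none).foldl
            (fun acc2 p2 => acc2 ++ [(x.1, p2)]) acc)
        acc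
      = acc ++ pairRec (fun y q => y.2 == q.2) (fun y q => (y.1, q.1)) suf := by
  intro suf
  induction suf with
  | nil => intro pre acc _; simp [ordOf, pairRec]
  | cons y suf' ih =>
    intro pre acc hmp
    simp only [ordOf, List.foldl_cons]
    have hbucket : D.getD y.2 [] = bspec pre y.2 ++ y.1 :: bspec suf' y.2 := by
      rw [hD y.2, ← hmp, bspec_append]
      simp [bspec]
    have hslice : PySem.List.slice (D.getD y.2 []) (some (((bspec pre y.2).length : Int) + 1)) none
        = bspec suf' y.2 := by
      have hc : (((bspec pre y.2).length : Int) + 1) = (((bspec pre y.2).length + 1 : Nat) : Int) := by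
        push_cast; ring
      rw [hbucket, hc, PySem.List.slice_from_natCast]
      rw [show bspec pre y.2 ++ y.1 :: bspec suf' y.2 = (bspec pre y.2 ++ [y.1]) ++ bspec suf' y.2 by simp]
      rw [List.drop_append_of_le_length (by simp)]
      simp
    rw [hslice, PySem.List.foldl_append_singleton_eq_map]
    have hgoal : (bspec suf' y.2).map (fun p2 => (y.1, p2))
        = (suf'.filter (fun q => y.2 == q.2)).map (fun q => (y.1, q.1)) := by
      rw [bspec, List.map_map]
      congr 1
      apply List.filter_congr
      intro q _
      rcases eq_or_ne q.2 y.2 with h | h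
      · simp [h]
      · simp [h, Ne.symm h]
    rw [ih (pre ++ [y]) (acc ++ (bspec suf' y.2).map (fun p2 => (y.1, p2))) (by simpa using hmp)]
    simp [pairRec, hgoal]

-- ===== VERDICT (by name: the statement is the Claim_ definition above) =====
theorem get_teammate_pairs_py_spec : Claim_equal_get_teammate_pairs_py := by
  intro players _
  unfold Spec_get_teammate_pairs_py get_teammate_pairs_py get_teammate_pairs_py_alt
  simp only []
  have hbuild := build_inv players PySem.Dict.empty [] []
    (by intro t; simp [bspec, PySem.Dict.getD_empty])
  rw [hbuild.1]
  simp only [List.nil_append]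
  rw [emit_inv _ (mapOf players) hbuild.2 (mapOf players) [] [] rfl]
  have hA := pair_loop_aux
    (fun p1 p2 =>
      strOptTruthy (teamMappingA.get? p1) && strOptTruthy (teamMappingA.get? p2)
        && (teamMappingA.get? p1 == teamMappingA.get? p2))
    (fun p1 p2 => (p1, p2)) players [] []
  simp only [List.length_nil, Nat.cast_zero, List.nil_append] at hA
  rw [hA, pairRec_eq]
  simp
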